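-- pv_equiv track=rewrite | github.com/jyb2605/jackkong_algo | week 11~20/week13_20200614/jaeyeonlee0621_예산.py | solution
-- ===== SOURCE A (Python) =====
-- def solution(budgets, M):
--     min_ = 0
--     max_ = max(budgets) + 1
--     while True:
--         mid_ = int((min_ + max_) / 2)
--         if mid_ == min_ or mid_ == max_: return mid_
--         sum = 0
--         for budget in budgets:
--             if budget >= mid_:
--                 sum += mid_
--             else:
--                 sum += budget
--         if sum >= M: max_ = mid_
--         if sum < M: min_ = mid_
-- ===== SOURCE B (Python) =====
-- def solution(budgets, M):
--     bs = sorted(budgets)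
--     T = M - 1          # strict sum < M  <=>  sum <= T
--     prefix = 0
--     slope = len(bs)
--     for b in bs:
--         # capped sum at cutoff b equals prefix + b*slope; first time it exceeds T,
--         # the optimal cutoff lies in this segment
--         if prefix + b * slope > T:
--             x = (T - prefix) // slope
--             return x if x > 0 else 0
--         prefix += b
--         slope -= 1
--     return bs[-1]
-- ===== Notes on version B (the rewrite author's own statement) =====
-- stated objective: alternative
-- what changed: Replaces the binary search over cutoff values (re-summing the whole list each probe) by sort + one prefix-sum sweep that solves the crossing segment in closed form with a floor division.
-- outside the precondition, e.g. on solution([-5], -4): A returns -3, B returns -5; on solution([], 0): A raises ValueError, B raises IndexError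
import Mathlib
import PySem

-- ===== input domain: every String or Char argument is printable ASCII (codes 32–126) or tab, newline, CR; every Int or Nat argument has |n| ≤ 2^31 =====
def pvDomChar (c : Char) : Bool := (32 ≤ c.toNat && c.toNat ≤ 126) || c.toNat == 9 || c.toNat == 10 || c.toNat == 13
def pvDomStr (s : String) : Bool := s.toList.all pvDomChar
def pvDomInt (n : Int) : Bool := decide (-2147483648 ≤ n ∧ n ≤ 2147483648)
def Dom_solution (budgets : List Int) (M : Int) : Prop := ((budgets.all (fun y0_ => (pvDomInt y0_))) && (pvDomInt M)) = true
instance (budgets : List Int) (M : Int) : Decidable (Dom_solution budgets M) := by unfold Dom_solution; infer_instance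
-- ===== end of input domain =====

-- B replaces A's binary search over cutoffs by sort + pfx-sum sweep solving the crossing
-- segment in closed form (objective: alternative algorithm, similar cost).

-- ===== PORT A =====
-- the inner 'for budget in budgets: sum += …' loop of A
def pySumA (budgets : List Int) (mid : Int) : Int :=
  budgets.foldl (fun acc budget => if budget ≥ mid then acc + mid else acc + budget) 0

-- A's 'while True' loop; fuel only makes it total (under Pre_ the interval length
-- max_-min_ bounds the iterations, so fuel (mx+1).natAbs+1 is never exhausted: proved below).
-- 'int((min_+max_)/2)' is ported as floordiv: under Pre_ min_,max_ stay ≥ 0 so Python's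
-- exact float halving + toward-zero int() equals floor division.
def solLoopA (budgets : List Int) (M : Int) : Nat → Int → Int → Int
  | 0, _, _ => 0
  | fuel + 1, min_, max_ =>
    let mid_ := PySem.Int.floordiv (min_ + max_) 2
    if mid_ = min_ ∨ mid_ = max_ then mid_
    else
      let s := pySumA budgets mid_
      let max' := if s ≥ M then mid_ else max_
      let min' := if s < M then mid_ else min_
      solLoopA budgets M fuel min' max'

def solution (budgets : List Int) (M : Int) : Int :=
  match PySem.List.max? budgets (fun x => x) with
  | none => 0   -- max([]) raises ValueError: excluded by Pre_
  | some mx => solLoopA budgets M ((mx + 1).natAbs + 1) 0 (mx + 1)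

-- ===== PORT B =====
-- B's 'for b in bs' sweep: pfx = sum of consumed budgets, slope = #remaining
def altLoop (T : Int) : List Int → Int → Int → Option Int
  | [], _, _ => none
  | b :: rest, pfx, slope =>
    if pfx + b * slope > T then
      some (if PySem.Int.floordiv (T - pfx) slope > 0 then PySem.Int.floordiv (T - pfx) slope else 0)
    else altLoop T rest (pfx + b) (slope - 1)

def solution_alt (budgets : List Int) (M : Int) : Int :=
  let bs := PySem.List.sorted budgets (fun x => x) false
  match altLoop (M - 1) bs 0 bs.length with
  | some x => x
  | none => (PySem.List.pyGet? bs (-1)).getD 0   -- bs[-1]; bs = [] (IndexError) is excluded by Pre_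

-- ===== PRECONDITION & SPEC =====
-- Pre_ excludes (a) the empty list, on which both A (max) and B (bs[-1]) raise, and
-- (b) lists whose budgets are all negative, on which A's binary search runs on the inverted
-- interval [0, max+1] with toward-zero truncation and its value is accidental; A's and B's
-- values there are equally defensible corner choices.
def Pre_solution (budgets : List Int) (M : Int) : Prop :=
  budgets ≠ [] ∧ ∃ b ∈ budgets, 0 ≤ b
instance (budgets : List Int) (M : Int) : Decidable (Pre_solution budgets M) := by
  unfold Pre_solution; infer_instance

def pvWitness_solution : List Int × Int := ([1, 3, 2, 5], 9)

def Spec_solution (budgets : List Int) (M : Int) (out : Int) : Prop := out = solution_alt budgets M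
instance (budgets : List Int) (M : Int) (out : Int) : Decidable (Spec_solution budgets M out) := by
  unfold Spec_solution; infer_instance

-- ===== CLAIM (what is proved, stated in full; the proofs are below) =====
def Claim_equal_solution : Prop := ∀ (budgets : List Int) (M : Int), Dom_solution budgets M → Pre_solution budgets M → Spec_solution budgets M (solution budgets M)

-- ===== LEMMAS AND PROOFS =====

-- f(x) = the capped sum Σ min(b, x); both programs are characterised through it
def fval (budgets : List Int) (x : Int) : Int := (budgets.map (fun b => min b x)).sum

lemma pySumA_loop (mid : Int) (l : List Int) : ∀ a : Int,
    l.foldl (fun acc budget => if budget ≥ mid then acc + mid else acc + budget) a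
      = a + fval l mid := by
  induction l with
  | nil => intro a; simp [fval]
  | cons b t ih =>
      intro a
      simp only [List.foldl_cons, ih, fval, List.map_cons, List.sum_cons]
      rcases le_or_gt mid b with h | h
      · rw [if_pos h, min_eq_right h]; ring
      · rw [if_neg (by omega), min_eq_left (by omega)]; ring

lemma pySumA_eq (budgets : List Int) (mid : Int) : pySumA budgets mid = fval budgets mid := by
  simpa using pySumA_loop mid budgets 0

lemma fval_mono (budgets : List Int) {x y : Int} (h : x ≤ y) :
    fval budgets x ≤ fval budgets y := by
  induction budgets with
  | nil => simp [fval]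
  | cons b t ih =>
      simp only [fval, List.map_cons, List.sum_cons] at *
      have : min b x ≤ min b y := by omega
      omega

lemma fval_append (l₁ l₂ : List Int) (x : Int) :
    fval (l₁ ++ l₂) x = fval l₁ x + fval l₂ x := by
  simp [fval]

lemma fval_le_sum (l : List Int) (x : Int) : fval l x ≤ l.sum := by
  induction l with
  | nil => simp [fval]
  | cons b t ih => simp only [fval, List.map_cons, List.sum_cons] at *; omega

lemma fval_le_mul (l : List Int) (x : Int) : fval l x ≤ x * l.length := by
  induction l with
  | nil => simp [fval]
  | cons b t ih =>
      simp only [fval, List.map_cons, List.sum_cons, List.length_cons] at *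
      have : min b x ≤ x := min_le_right _ _
      push_cast
      nlinarith

lemma fval_eq_sum_of_le {l : List Int} {x : Int} (h : ∀ b ∈ l, b ≤ x) :
    fval l x = l.sum := by
  induction l with
  | nil => simp [fval]
  | cons b t ih =>
      have hb : min b x = b := min_eq_left (h b (by simp))
      simp only [fval, List.map_cons, List.sum_cons] at *
      rw [hb, ih (fun c hc => h c (by simp [hc]))]

lemma fval_eq_mul_of_ge {l : List Int} {x : Int} (h : ∀ b ∈ l, x ≤ b) :
    fval l x = x * l.length := by
  induction l with
  | nil => simp [fval]
  | cons b t ih =>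
      have hb : min b x = x := min_eq_right (h b (by simp))
      simp only [fval, List.map_cons, List.sum_cons, List.length_cons] at *
      rw [hb, ih (fun c hc => h c (by simp [hc]))]
      push_cast
      ring

lemma fval_perm {l₁ l₂ : List Int} (h : l₁.Perm l₂) (x : Int) :
    fval l₁ x = fval l₂ x := (h.map _).sum_eq

lemma le_getLast_of_pairwise :
    ∀ {l : List Int}, l.Pairwise (fun a b => a ≤ b) → ∀ (hne : l ≠ []) {y : Int},
      y ∈ l → y ≤ l.getLast hne := by
  intro l
  induction l with
  | nil => intro _ hne; exact absurd rfl hne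
  | cons a t ih =>
      intro hp hne y hy
      rcases List.pairwise_cons.mp hp with ⟨ha, hpt⟩
      cases t with
      | nil => simp at hy; simp [hy]
      | cons c u =>
          rw [List.getLast_cons (by simp)]
          rcases List.mem_cons.mp hy with h | h
          · subst h
            exact le_trans (ha _ (List.getLast_mem _)) le_rfl
          · exact ih hpt (by simp) h

-- the value both programs return: largest cutoff r ∈ [0, mx] with f(r) < M, or 0
def Good (budgets : List Int) (M mx r : Int) : Prop :=
  0 ≤ r ∧ r ≤ mx ∧ (r = 0 ∨ fval budgets r < M) ∧ (r = mx ∨ M ≤ fval budgets (r + 1))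

lemma Good_lt_absurd {budgets : List Int} {M mx r₁ r₂ : Int}
    (h₁ : Good budgets M mx r₁) (h₂ : Good budgets M mx r₂) (hlt : r₁ < r₂) : False := by
  obtain ⟨h10, h1mx, -, h1next⟩ := h₁
  obtain ⟨h20, h2mx, h2lt, -⟩ := h₂
  have hfu : M ≤ fval budgets (r₁ + 1) := by
    rcases h1next with h | h
    · omega
    · exact h
  have hfl : fval budgets r₂ < M := by
    rcases h2lt with h | h
    · omega
    · exact h
  have := fval_mono budgets (show r₁ + 1 ≤ r₂ by omega)
  omega

lemma Good_unique {budgets : List Int} {M mx r₁ r₂ : Int}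
    (h₁ : Good budgets M mx r₁) (h₂ : Good budgets M mx r₂) : r₁ = r₂ := by
  rcases lt_trichotomy r₁ r₂ with h | h | h
  · exact absurd (Good_lt_absurd h₁ h₂ h) (by simp)
  · exact h
  · exact absurd (Good_lt_absurd h₂ h₁ h) (by simp)

lemma solLoopA_good (budgets : List Int) (M mx : Int) :
    ∀ (fuel : Nat) (min_ max_ : Int), 0 ≤ min_ → min_ < max_ → max_ ≤ mx + 1 →
    (min_ = 0 ∨ fval budgets min_ < M) → (max_ = mx + 1 ∨ M ≤ fval budgets max_) →
    max_ - min_ ≤ fuel →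
    Good budgets M mx (solLoopA budgets M fuel min_ max_) := by
  intro fuel
  induction fuel with
  | zero => intro min_ max_ h0 hlt hub hminI hmaxI hfuel; omega
  | succ fuel ih =>
      intro min_ max_ h0 hlt hub hminI hmaxI hfuel
      rw [solLoopA]
      have hmid := PySem.Int.floordiv_two_mid_bounds (le_of_lt hlt)
      set mid_ := PySem.Int.floordiv (min_ + max_) 2 with hmiddef
      have hmid2 : mid_ * 2 ≤ min_ + max_ ∧ min_ + max_ < (mid_ + 1) * 2 := by
        constructor
        · exact (PySem.Int.le_floordiv_iff_mul_le (by omega)).mp (le_refl _)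
        · exact (PySem.Int.floordiv_lt_iff_lt_mul (by omega)).mp (by omega)
      by_cases hret : mid_ = min_ ∨ mid_ = max_
      · rw [if_pos hret]
        have hmideq : mid_ = min_ ∧ max_ = min_ + 1 := by omega
        refine ⟨by omega, by omega, ?_, ?_⟩
        · rcases hminI with h | h
          · exact Or.inl (by omega)
          · exact Or.inr (by rw [hmideq.1]; exact h)
        · rcases hmaxI with h | h
          · exact Or.inl (by omega)
          · refine Or.inr ?_
            have : mid_ + 1 = max_ := by omega
            rw [this]; exact h
      · rw [if_neg hret]
        rw [not_or] at hret
        have hmlo : min_ < mid_ := by omega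
        have hmhi : mid_ < max_ := by omega
        rw [pySumA_eq]
        by_cases hs : fval budgets mid_ ≥ M
        · have h1 : (if fval budgets mid_ ≥ M then mid_ else max_) = mid_ := if_pos hs
          have h2 : (if fval budgets mid_ < M then mid_ else min_) = min_ := if_neg (by omega)
          show Good budgets M mx (solLoopA budgets M fuel
            (if fval budgets mid_ < M then mid_ else min_)
            (if fval budgets mid_ ≥ M then mid_ else max_))
          rw [h1, h2]
          exact ih min_ mid_ h0 hmlo (by omega) hminI (Or.inr hs) (by omega)
        · have h1 : (if fval budgets mid_ ≥ M then mid_ else max_) = max_ := if_neg hs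
          have h2 : (if fval budgets mid_ < M then mid_ else min_) = mid_ := if_pos (by omega)
          show Good budgets M mx (solLoopA budgets M fuel
            (if fval budgets mid_ < M then mid_ else min_)
            (if fval budgets mid_ ≥ M then mid_ else max_))
          rw [h1, h2]
          exact ih mid_ max_ (by omega) hmhi hub (Or.inr (by omega)) hmaxI (by omega)

lemma solution_good (budgets : List Int) (M mx : Int)
    (hmax : PySem.List.max? budgets (fun x => x) = some mx) (hmx0 : 0 ≤ mx) :
    Good budgets M mx (solution budgets M) := by
  unfold solution
  rw [hmax]
  exact solLoopA_good budgets M mx ((mx + 1).natAbs + 1) 0 (mx + 1)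
    le_rfl (by omega) le_rfl (Or.inl rfl) (Or.inl rfl) (by omega)

lemma altLoop_good (budgets : List Int) (M mx : Int)
    (hub : ∀ b ∈ budgets, b ≤ mx) (hmx0 : 0 ≤ mx) (hne : budgets ≠ []) :
    ∀ (rest done : List Int),
    done ++ rest = PySem.List.sorted budgets (fun x => x) false →
    (∀ d ∈ done, done.sum + d * rest.length ≤ M - 1) →
    Good budgets M mx ((altLoop (M - 1) rest done.sum rest.length).getD mx) := by
  have hperm := PySem.List.sorted_perm budgets (fun x => x) false
  have hpair : (PySem.List.sorted budgets (fun x => x) false).Pairwise (fun a b => a ≤ b) :=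
    PySem.List.sorted_pairwise budgets (fun x => x)
  intro rest
  induction rest with
  | nil =>
      intro done hsplit hinv
      simp only [altLoop, Option.getD_none]
      have hdone : done = PySem.List.sorted budgets (fun x => x) false := by simpa using hsplit
      have hdperm : done.Perm budgets := by rw [hdone]; exact hperm
      have hdn2 : done ≠ [] := by
        intro h
        apply hne
        have h0 : budgets.length = 0 := by rw [← hdperm.length_eq, h]; rfl
        exact List.eq_nil_of_length_eq_zero h0
      obtain ⟨d, hd⟩ := List.exists_mem_of_ne_nil done hdn2
      have hsum : done.sum ≤ M - 1 := by have := hinv d hd; simpa using this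
      have hfv : fval budgets mx = budgets.sum := fval_eq_sum_of_le hub
      have hbsum : budgets.sum = done.sum := hdperm.sum_eq.symm
      exact ⟨hmx0, le_rfl, Or.inr (by omega), Or.inl rfl⟩
  | cons b rest' ih =>
      intro done hsplit hinv
      have hpairs : (done ++ b :: rest').Pairwise (fun a b => a ≤ b) := by
        rw [hsplit]; exact hpair
      have hdb : ∀ d ∈ done, d ≤ b := by
        intro d hd
        exact (List.pairwise_append.mp hpairs).2.2 d hd b (by simp)
      have hbr : ∀ c ∈ rest', b ≤ c := by
        intro c hc
        exact (List.pairwise_cons.mp (List.pairwise_append.mp hpairs).2.1).1 c hc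
      have hbmem : b ∈ budgets := by
        have : b ∈ done ++ b :: rest' := by simp
        rw [hsplit] at this
        exact hperm.subset this
      have hfeq : ∀ x : Int, fval budgets x = fval done x + fval (b :: rest') x := by
        intro x
        rw [← fval_perm (hsplit ▸ hperm : (done ++ b :: rest').Perm budgets) x, fval_append]
      set T := M - 1 with hT
      set P := done.sum with hP
      set s : Int := ((b :: rest').length : Int) with hs
      have hs0 : 0 < s := by simp [hs]
      rw [altLoop]
      by_cases hc : P + b * s > T
      · rw [if_pos hc]
        set x := PySem.Int.floordiv (T - P) s with hx
        have hx1 : x * s ≤ T - P := (PySem.Int.le_floordiv_iff_mul_le hs0).mp le_rfl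
        have hx2 : T - P < (x + 1) * s := (PySem.Int.floordiv_lt_iff_lt_mul hs0).mp (by omega)
        have hxb : x < b := by nlinarith
        have hdlex : ∀ d ∈ done, d ≤ x := by
          intro d hd
          exact (PySem.Int.le_floordiv_iff_mul_le hs0).mpr (by have := hinv d hd; omega)
        have hbmx : b ≤ mx := hub b hbmem
        have hnext : M ≤ fval budgets (x + 1) := by
          have h1 : fval done (x + 1) = done.sum :=
            fval_eq_sum_of_le (fun d hd => by have := hdlex d hd; omega)
          have h2 : fval (b :: rest') (x + 1) = (x + 1) * s := by
            rw [fval_eq_mul_of_ge]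
            intro c hc'
            rcases List.mem_cons.mp hc' with h | h
            · omega
            · have := hbr c h; omega
          rw [hfeq, h1, h2]
          omega
        by_cases hxpos : x > 0
        · rw [if_pos hxpos]
          simp only [Option.getD_some]
          refine ⟨by omega, by omega, Or.inr ?_, Or.inr hnext⟩
          have h1 : fval done x ≤ done.sum := fval_le_sum _ _
          have h2 : fval (b :: rest') x ≤ x * s := by
            have := fval_le_mul (b :: rest') x
            simpa [hs] using this
          rw [hfeq]
          omega
        · rw [if_neg hxpos]
          simp only [Option.getD_some]
          by_cases hmx : mx = 0
          · exact ⟨le_rfl, by omega, Or.inl rfl, Or.inl (by omega)⟩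
          · refine ⟨le_rfl, hmx0, Or.inl rfl, Or.inr ?_⟩
            have := fval_mono budgets (show x + 1 ≤ 0 + 1 by omega)
            omega
      · rw [if_neg hc]
        have hrecast : s - 1 = ((rest'.length : Int)) := by simp [hs]
        have hsum' : P + b = (done ++ [b]).sum := by simp [hP]
        have hgoal := ih (done ++ [b]) (by simpa using hsplit) ?_
        · rw [hrecast, hsum']
          simpa using hgoal
        · intro d hd
          rcases List.mem_append.mp hd with h | h
          · have hold := hdb d h
            have : (d - b) * (s - 1) ≤ 0 :=
              mul_nonpos_of_nonpos_of_nonneg (by omega) (by omega)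
            have hbs : (done ++ [b]).sum = P + b := by simp [hP]
            rw [hbs, ← hrecast]
            nlinarith [this, hc]
          · have hdb' : d = b := by simpa using h
            subst hdb'
            have hbs : (done ++ [d]).sum = P + d := by simp [hP]
            rw [hbs]
            have : (P + d) + d * (rest'.length : Int) = P + d * s := by
              simp [hs]; ring
            omega

lemma solution_alt_good (budgets : List Int) (M mx : Int)
    (hmax : PySem.List.max? budgets (fun x => x) = some mx) (hmx0 : 0 ≤ mx)
    (hne : budgets ≠ []) :
    Good budgets M mx (solution_alt budgets M) := by
  have hub := PySem.List.max?_isMax hmax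
  have hperm := PySem.List.sorted_perm budgets (fun x => x) false
  have hgood := altLoop_good budgets M mx hub hmx0 hne
      (PySem.List.sorted budgets (fun x => x) false) [] (by simp) (by simp)
  unfold solution_alt
  set bs := PySem.List.sorted budgets (fun x => x) false with hbs
  simp only [List.sum_nil] at hgood
  cases h : altLoop (M - 1) bs 0 (bs.length : Int) with
  | some x =>
      rw [h] at hgood
      simpa [h] using hgood
  | none =>
      rw [h] at hgood
      simp only [Option.getD_none] at hgood
      have hbsne : bs ≠ [] := by
        intro h0
        apply hne
        have hl := hperm.length_eq
        rw [h0] at hl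
        exact List.eq_nil_of_length_eq_zero hl.symm
      have hlast : (PySem.List.pyGet? bs (-1)).getD 0 = mx := by
        rw [PySem.List.pyGet?_neg_one, List.getLast?_eq_some_getLast hbsne]
        simp only [Option.getD_some]
        have hpair : bs.Pairwise (fun a b => a ≤ b) :=
          PySem.List.sorted_pairwise budgets (fun x => x)
        have h1 : bs.getLast hbsne ≤ mx := hub _ (hperm.subset (List.getLast_mem hbsne))
        have h2 : mx ≤ bs.getLast hbsne :=
          le_getLast_of_pairwise hpair hbsne (hperm.symm.subset (PySem.List.max?_mem hmax))
        omega
      simp only [h, hlast]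
      exact hgood

-- ===== VERDICT (by name: the statement is the Claim_ definition above) =====
theorem solution_spec : Claim_equal_solution := by
  intro budgets M _hDom hPre
  obtain ⟨hne, b, hb, hb0⟩ := hPre
  obtain ⟨mx, hmax⟩ : ∃ mx, PySem.List.max? budgets (fun x => x) = some mx := by
    cases h : PySem.List.max? budgets (fun x => x) with
    | none => exact absurd ((PySem.List.max?_eq_none_iff budgets _).mp h) hne
    | some mx => exact ⟨mx, rfl⟩
  have hmx0 : 0 ≤ mx := le_trans hb0 (PySem.List.max?_isMax hmax b hb)
  exact Good_unique (solution_good budgets M mx hmax hmx0)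
    (solution_alt_good budgets M mx hmax hmx0 hne)
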